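-- pv_equiv track=rewrite | github.com/sarospa/project-euler-python | euler-105.py | verify_set
-- ===== SOURCE A (Python) =====
-- import itertools
--
-- def verify_set(nums):
-- 	if nums is None:
-- 		return False
-- 	last_max = 0
-- 	for i in range(1, len(nums)):
-- 		combos = list(itertools.combinations(nums, i))
-- 		sums = {sum(combo) for combo in combos}
-- 		if len(combos) != len(sums) or min(sums) <= last_max:
-- 			return False
-- 		last_max = max(sums)
-- 	return True
-- ===== SOURCE B (Python) =====
-- def verify_set(nums):
--     # One DP pass over the elements builds table[k] = sums of all k-element
--     # subsets (as a list); then a separate validation pass over sizes 1..n-1.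
--     if nums is None:
--         return False
--     table = [[0]]
--     for x in nums:
--         table = [(table[k] if k < len(table) else [])
--                  + ([s + x for s in table[k - 1]] if k > 0 else [])
--                  for k in range(len(table) + 1)]
--     last_max = 0
--     for i in range(1, len(nums)):
--         sums = table[i]
--         if len(sums) != len(set(sums)) or min(sums) <= last_max:
--             return False
--         last_max = max(sums)
--     return True
-- ===== Notes on version B (the rewrite author's own statement) =====
-- stated objective: alternative
-- what changed: A regenerates itertools.combinations from scratch for every size i and sums each tuple, returning early on the first violation; B instead makes one table-first DP pass over the elements building the complete size-indexed lists of subset sums, then validates sizes 1..n-1 in a separate pass - a different decomposition that trades A's early exit for incremental sum computation (so B always pays the full 2^n table and is slower when A rejects early).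
import Mathlib
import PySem

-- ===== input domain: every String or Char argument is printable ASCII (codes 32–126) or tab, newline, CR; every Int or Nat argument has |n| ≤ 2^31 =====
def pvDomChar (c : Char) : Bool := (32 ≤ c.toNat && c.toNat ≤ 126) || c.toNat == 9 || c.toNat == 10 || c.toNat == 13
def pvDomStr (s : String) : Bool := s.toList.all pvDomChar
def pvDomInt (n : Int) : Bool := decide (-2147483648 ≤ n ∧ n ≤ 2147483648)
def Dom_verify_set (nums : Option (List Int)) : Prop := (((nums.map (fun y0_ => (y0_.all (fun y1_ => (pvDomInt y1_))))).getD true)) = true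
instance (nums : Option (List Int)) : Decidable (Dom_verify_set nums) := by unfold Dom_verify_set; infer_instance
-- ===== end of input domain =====

-- B builds the per-size subset-sum lists by one DP pass over the elements instead of
-- regenerating itertools.combinations for every size; same return value everywhere.

-- ===== PORT A =====
-- 'for i in range(1, len(nums))' with early return; min/max of the sum set are taken
-- with .getD 0, exact because that set is provably nonempty for every i in the range.
def verify_set_aLoop (nums : List Int) : List Int → Int → Bool
  | [], _ => true
  | i :: rest, lastMax =>
    let combos := PySem.List.combinations nums i.toNat
    let sums := PySem.Set.ofList (combos.map List.sum)
    if combos.length ≠ sums.length ∨ (PySem.List.min? sums (fun x => x)).getD 0 ≤ lastMax then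
      false
    else
      verify_set_aLoop nums rest ((PySem.List.max? sums (fun x => x)).getD 0)

def verify_set (nums : Option (List Int)) : Bool :=
  match nums with
  | none => false
  | some ns => verify_set_aLoop ns (PySem.List.pyRange 1 (ns.length : Int) 1) 0

-- ===== PORT B =====
-- one step of Source B's element loop: new[k] = (old[k] or []) ++ map (·+x) old[k-1]
def verify_set_bstep (x : Int) (tbl : List (List Int)) : List (List Int) :=
  List.zipWith (· ++ ·) (tbl ++ [[]]) ([] :: tbl.map (List.map (fun s => s + x)))

-- validation pass over sizes, with early return; table[i] is read with default []
-- and min/max with .getD 0, exact because i is provably in range and the list nonempty.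
def verify_set_bLoop (tbl : List (List Int)) : List Int → Int → Bool
  | [], _ => true
  | i :: rest, lastMax =>
    let sums := PySem.List.pyGetD tbl i []
    if sums.length ≠ (PySem.Set.ofList sums).length ∨ (PySem.List.min? sums (fun x => x)).getD 0 ≤ lastMax then
      false
    else
      verify_set_bLoop tbl rest ((PySem.List.max? sums (fun x => x)).getD 0)

def verify_set_alt (nums : Option (List Int)) : Bool :=
  match nums with
  | none => false
  | some ns =>
    let tbl := ns.foldl (fun t x => verify_set_bstep x t) [[0]]
    verify_set_bLoop tbl (PySem.List.pyRange 1 (ns.length : Int) 1) 0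

-- ===== PRECONDITION & SPEC =====
def Spec_verify_set (nums : Option (List Int)) (out : Bool) : Prop := out = verify_set_alt nums
instance (nums : Option (List Int)) (out : Bool) : Decidable (Spec_verify_set nums out) := by unfold Spec_verify_set; infer_instance

-- ===== CLAIM (what is proved, stated in full; the proofs are below) =====
def Claim_equal_verify_set : Prop := ∀ (nums : Option (List Int)), Dom_verify_set nums → Spec_verify_set nums (verify_set nums)

-- ===== LEMMAS AND PROOFS =====

-- sums of all k-element combinations: the quantity A computes per size
def SumsK (xs : List Int) (k : Nat) : List Int := (PySem.List.combinations xs k).map List.sum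

lemma combs_snoc (ys : List Int) (x : Int) : ∀ (r : Nat),
    (PySem.List.combinations (ys ++ [x]) (r+1)).Perm
      (PySem.List.combinations ys (r+1) ++ (PySem.List.combinations ys r).map (· ++ [x])) := by
  induction ys with
  | nil =>
    intro r
    cases r with
    | zero => simp [PySem.List.combinations_cons_succ, PySem.List.combinations_zero,
        PySem.List.combinations_nil_succ]
    | succ s => simp [PySem.List.combinations_cons_succ, PySem.List.combinations_nil_succ]
  | cons y t ih =>
    intro r
    rw [← Multiset.coe_eq_coe]
    cases r with
    | zero =>
      have h0 := (Multiset.coe_eq_coe).2 (ih 0)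
      simp only [List.cons_append, PySem.List.combinations_cons_succ,
        PySem.List.combinations_zero, ← Multiset.coe_add, ← Multiset.map_coe] at *
      rw [h0]
      abel
    | succ s =>
      have h1 := (Multiset.coe_eq_coe).2 (ih s)
      have h2 := (Multiset.coe_eq_coe).2 (ih (s+1))
      simp only [List.cons_append, PySem.List.combinations_cons_succ, ← Multiset.coe_add,
        ← Multiset.map_coe] at *
      rw [h1, h2]
      simp only [Multiset.map_add, Multiset.map_map, Function.comp_def, List.cons_append]
      abel

lemma sumsK_snoc (ys : List Int) (x : Int) (r : Nat) :
    (SumsK (ys ++ [x]) (r+1)).Perm (SumsK ys (r+1) ++ (SumsK ys r).map (· + x)) := by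
  have h := (combs_snoc ys x r).map List.sum
  simpa [SumsK, List.map_map, Function.comp_def, List.sum_append] using h

lemma sumsK_zero (xs : List Int) : SumsK xs 0 = [0] := by
  simp [SumsK, PySem.List.combinations_zero]

lemma sumsK_of_lt (xs : List Int) (k : Nat) (h : xs.length < k) : SumsK xs k = [] := by
  simp [SumsK, PySem.List.combinations_eq_nil_of_length_lt xs h]

-- elementwise description of one DP step, valid for EVERY index k
lemma bstep_aux (a : Int) : ∀ (T : List (List Int)) (u : List Int) (k : Nat),
    (List.zipWith (· ++ ·) (T ++ [[]]) (u :: T.map (List.map (fun s => s + a)))).getD k []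
      = (T.getD k []) ++ (if k = 0 then u else (T.getD (k-1) []).map (fun s => s + a)) := by
  intro T
  induction T with
  | nil =>
    intro u k
    cases k with
    | zero => simp
    | succ j => simp
  | cons t T' ih =>
    intro u k
    cases k with
    | zero => simp
    | succ j =>
      simp only [List.cons_append, List.map_cons, List.zipWith_cons_cons, List.getD_cons_succ]
      rw [ih (t.map (fun s => s + a)) j]
      cases j with
      | zero => simp
      | succ i => simp

lemma bstep_getD (a : Int) (T : List (List Int)) (k : Nat) :
    (verify_set_bstep a T).getD k []
      = (T.getD k []) ++ (if k = 0 then [] else (T.getD (k-1) []).map (fun s => s + a)) := by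
  cases T with
  | nil =>
    cases k with
    | zero => simp [verify_set_bstep]
    | succ j => simp [verify_set_bstep]
  | cons t T' =>
    cases k with
    | zero => simp [verify_set_bstep]
    | succ j =>
      show (List.zipWith (· ++ ·) (t :: (T' ++ [[]]))
        ([] :: (t.map (fun s => s + a) :: T'.map (List.map (fun s => s + a))))).getD (j+1) [] = _
      simp only [List.zipWith_cons_cons, List.getD_cons_succ]
      rw [bstep_aux a T' (t.map (fun s => s + a)) j]
      cases j with
      | zero => simp
      | succ i => simp

-- the DP table after the element pass: entry k is a permutation of SumsK
lemma table_perm (xs : List Int) (k : Nat) :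
    ((xs.foldl (fun t x => verify_set_bstep x t) [[0]]).getD k []).Perm (SumsK xs k) := by
  induction xs using List.reverseRecOn generalizing k with
  | nil =>
    cases k with
    | zero => simp [sumsK_zero]
    | succ j => simp [sumsK_of_lt [] (j+1) (by simp)]
  | append_singleton xs a ih =>
    rw [List.foldl_append]
    simp only [List.foldl_cons, List.foldl_nil]
    rw [bstep_getD]
    cases k with
    | zero =>
      simp only [sumsK_zero]
      simpa [sumsK_zero] using ih 0
    | succ j =>
      simp only [if_neg (Nat.succ_ne_zero j), Nat.add_sub_cancel]
      refine ((List.Perm.append (ih (j+1)) ((ih j).map _))).trans ?_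
      exact (sumsK_snoc xs a j).symm

lemma min?_id_congr (l₁ l₂ : List Int) (h : ∀ y, y ∈ l₁ ↔ y ∈ l₂) :
    PySem.List.min? l₁ (fun x => x) = PySem.List.min? l₂ (fun x => x) := by
  cases h₁ : PySem.List.min? l₁ (fun x => x) with
  | none =>
    cases h₂ : PySem.List.min? l₂ (fun x => x) with
    | none => rfl
    | some m =>
      have hm := PySem.List.min?_mem h₂
      have : l₁ = [] := (PySem.List.min?_eq_none_iff _ _).1 h₁
      subst this
      exact absurd ((h m).2 hm) (List.not_mem_nil)
  | some m₁ =>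
    cases h₂ : PySem.List.min? l₂ (fun x => x) with
    | none =>
      have : l₂ = [] := (PySem.List.min?_eq_none_iff _ _).1 h₂
      subst this
      exact absurd ((h m₁).1 (PySem.List.min?_mem h₁)) (List.not_mem_nil)
    | some m₂ =>
      have a1 := PySem.List.min?_isMin h₁ m₂ ((h m₂).2 (PySem.List.min?_mem h₂))
      have a2 := PySem.List.min?_isMin h₂ m₁ ((h m₁).1 (PySem.List.min?_mem h₁))
      simp at a1 a2 ⊢
      omega

lemma max?_id_congr (l₁ l₂ : List Int) (h : ∀ y, y ∈ l₁ ↔ y ∈ l₂) :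
    PySem.List.max? l₁ (fun x => x) = PySem.List.max? l₂ (fun x => x) := by
  cases h₁ : PySem.List.max? l₁ (fun x => x) with
  | none =>
    cases h₂ : PySem.List.max? l₂ (fun x => x) with
    | none => rfl
    | some m =>
      have hm := PySem.List.max?_mem h₂
      have : l₁ = [] := (PySem.List.max?_eq_none_iff _ _).1 h₁
      subst this
      exact absurd ((h m).2 hm) (List.not_mem_nil)
  | some m₁ =>
    cases h₂ : PySem.List.max? l₂ (fun x => x) with
    | none =>
      have : l₂ = [] := (PySem.List.max?_eq_none_iff _ _).1 h₂
      subst this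
      exact absurd ((h m₁).1 (PySem.List.max?_mem h₁)) (List.not_mem_nil)
    | some m₂ =>
      have a1 := PySem.List.max?_isMax h₁ m₂ ((h m₂).2 (PySem.List.max?_mem h₂))
      have a2 := PySem.List.max?_isMax h₂ m₁ ((h m₁).1 (PySem.List.max?_mem h₁))
      simp at a1 a2 ⊢
      omega

lemma ofList_length_congr (l₁ l₂ : List Int) (h : ∀ y, y ∈ l₁ ↔ y ∈ l₂) :
    (PySem.Set.ofList l₁).length = (PySem.Set.ofList l₂).length := by
  have hp : (PySem.Set.ofList l₁).Perm (PySem.Set.ofList l₂) := by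
    rw [List.perm_ext_iff_of_nodup (PySem.Set.nodup_ofList _) (PySem.Set.nodup_ofList _)]
    intro y; simp [PySem.Set.mem_ofList, h y]
  exact hp.length_eq

lemma loops_eq (nums : List Int) : ∀ (is : List Int),
    (∀ i ∈ is, 1 ≤ i ∧ i < (nums.length : Int)) → ∀ (lastMax : Int),
    verify_set_aLoop nums is lastMax
      = verify_set_bLoop (nums.foldl (fun t x => verify_set_bstep x t) [[0]]) is lastMax := by
  intro is
  induction is with
  | nil => intro _ lastMax; rfl
  | cons i rest ih =>
    intro hmem lastMax
    obtain ⟨hi1, hi2⟩ := hmem i (List.mem_cons_self)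
    have hcast : i = ((i.toNat : Nat) : Int) := (Int.toNat_of_nonneg (by omega)).symm
    set tbl := nums.foldl (fun t x => verify_set_bstep x t) [[0]] with htbl
    have hget : PySem.List.pyGetD tbl i ([] : List Int) = tbl.getD i.toNat [] := by
      conv_lhs => rw [hcast]
      rw [PySem.List.pyGetD_natCast]
    have hperm : (tbl.getD i.toNat []).Perm (SumsK nums i.toNat) := table_perm nums i.toNat
    have hmemiff : ∀ y, y ∈ PySem.Set.ofList (SumsK nums i.toNat) ↔ y ∈ tbl.getD i.toNat [] := by
      intro y
      rw [PySem.Set.mem_ofList]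
      exact (hperm.mem_iff).symm
    show (if (PySem.List.combinations nums i.toNat).length
            ≠ (PySem.Set.ofList ((PySem.List.combinations nums i.toNat).map List.sum)).length
          ∨ (PySem.List.min? (PySem.Set.ofList ((PySem.List.combinations nums i.toNat).map List.sum)) (fun x => x)).getD 0 ≤ lastMax
        then false
        else verify_set_aLoop nums rest
          ((PySem.List.max? (PySem.Set.ofList ((PySem.List.combinations nums i.toNat).map List.sum)) (fun x => x)).getD 0))
      = (if (PySem.List.pyGetD tbl i ([] : List Int)).length
            ≠ (PySem.Set.ofList (PySem.List.pyGetD tbl i ([] : List Int))).length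
          ∨ (PySem.List.min? (PySem.List.pyGetD tbl i ([] : List Int)) (fun x => x)).getD 0 ≤ lastMax
        then false
        else verify_set_bLoop tbl rest
          ((PySem.List.max? (PySem.List.pyGetD tbl i ([] : List Int)) (fun x => x)).getD 0))
    rw [hget]
    have hSA : (PySem.List.combinations nums i.toNat).map List.sum = SumsK nums i.toNat := rfl
    rw [hSA]
    have hlen : (PySem.List.combinations nums i.toNat).length = (tbl.getD i.toNat []).length := by
      rw [hperm.length_eq]; simp [SumsK]
    have hslen : (PySem.Set.ofList (SumsK nums i.toNat)).length
        = (PySem.Set.ofList (tbl.getD i.toNat [])).length :=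
      ofList_length_congr _ _ (fun y => hperm.mem_iff.symm)
    have hmin : PySem.List.min? (PySem.Set.ofList (SumsK nums i.toNat)) (fun x => x)
        = PySem.List.min? (tbl.getD i.toNat []) (fun x => x) := min?_id_congr _ _ hmemiff
    have hmax : PySem.List.max? (PySem.Set.ofList (SumsK nums i.toNat)) (fun x => x)
        = PySem.List.max? (tbl.getD i.toNat []) (fun x => x) := max?_id_congr _ _ hmemiff
    rw [hlen, hslen, hmin, hmax]
    have hrest : ∀ j ∈ rest, 1 ≤ j ∧ j < (nums.length : Int) :=
      fun j hj => hmem j (List.mem_cons_of_mem _ hj)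
    by_cases h : (tbl.getD i.toNat []).length ≠ (PySem.Set.ofList (tbl.getD i.toNat [])).length
        ∨ (PySem.List.min? (tbl.getD i.toNat []) (fun x => x)).getD 0 ≤ lastMax
    · rw [if_pos h, if_pos h]
    · rw [if_neg h, if_neg h]
      exact ih hrest _

-- ===== VERDICT (by name: the statement is the Claim_ definition above) =====
theorem verify_set_spec : Claim_equal_verify_set := by
  intro nums _
  unfold Spec_verify_set
  match nums with
  | none => rfl
  | some ns =>
    show verify_set_aLoop ns (PySem.List.pyRange 1 (ns.length : Int) 1) 0 = _
    exact loops_eq ns _ (fun i hi => (PySem.List.mem_pyRange_one).1 hi) 0
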